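-- pv_equiv track=rewrite | github.com/egorliovkin/python_learning_001 | pin.py | get_pins
-- ===== SOURCE A (Python) =====
-- def get_pins(observed):
--     xss = {'1': ['1', '2', '4'],
--            '2': ['2', '1', '3', '5'],
--            '3': ['3', '2', '6'],
--            '4': ['4', '1', '5', '7'],
--            '5': ['5', '2', '4', '6', '8'],
--            '6': ['6', '3', '5', '9'],
--            '7': ['7', '4', '8'],
--            '8': ['8', '5', '7', '9', '0'],
--            '9': ['9','6','8'],
--            '0': ['0','8']}
--     xs = [[""],[""],[""],[""],[""],[""],[""],[""]]
--     for i in range(len(observed)):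
--         xs[i] = xss[observed[i]]
--     ys = [x1+x2+x3+x4+x5+x6+x7+x8
--           for x1 in xs[0]
--           for x2 in xs[1]
--           for x3 in xs[2]
--           for x4 in xs[3]
--           for x5 in xs[4]
--           for x6 in xs[5]
--           for x7 in xs[6]
--           for x8 in xs[7]]
--     return ys
-- ===== SOURCE B (Python) =====
-- def get_pins(observed):
--     neighbors = {'1': '124', '2': '2135', '3': '326', '4': '4157',
--                  '5': '52468', '6': '6359', '7': '748', '8': '85790',
--                  '9': '968', '0': '08'}
--
--     def build(i):
--         if i == len(observed):
--             return ['']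
--         return [x + rest for x in neighbors[observed[i]] for rest in build(i + 1)]
--
--     return build(0)
-- ===== Notes on version B (the rewrite author's own statement) =====
-- stated objective: simpler
-- what changed: Replaces the fixed 8-slot padded array and the flat 8-way nested comprehension by a recursive builder over the observed digits (prefix digit consed onto each recursively built suffix), with the neighbor map stored as strings instead of lists; Pre_ excludes inputs on which A raises (non-digit character -> KeyError, more than 8 characters -> IndexError).
import Mathlib
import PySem

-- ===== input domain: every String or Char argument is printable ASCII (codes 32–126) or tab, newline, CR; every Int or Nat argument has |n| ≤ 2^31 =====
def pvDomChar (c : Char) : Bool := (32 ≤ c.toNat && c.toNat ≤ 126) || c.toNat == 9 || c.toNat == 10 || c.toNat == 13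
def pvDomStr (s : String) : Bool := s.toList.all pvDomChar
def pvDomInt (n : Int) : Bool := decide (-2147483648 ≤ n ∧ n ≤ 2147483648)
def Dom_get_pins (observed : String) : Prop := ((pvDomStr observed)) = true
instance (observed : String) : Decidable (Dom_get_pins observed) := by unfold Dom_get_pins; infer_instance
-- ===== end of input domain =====

-- B replaces A's fixed 8-slot padded array and flat 8-way nested comprehension by a
-- recursive builder over the observed digits, with the neighbor map stored as strings
-- (same values, same order); Pre_ excludes inputs on which A raises (non-digit char ->
-- KeyError, length > 8 -> IndexError).


-- ===== PORT A =====
-- Python's 1-char strings are carried as List Char (str + is List.append, exact on this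
-- domain); each pin is converted to String once, at the very end, in both ports.
def pinTable : PySem.Dict (List Char) (List (List Char)) :=
  PySem.Dict.ofList
    [ (['1'], [['1'], ['2'], ['4']]),
      (['2'], [['2'], ['1'], ['3'], ['5']]),
      (['3'], [['3'], ['2'], ['6']]),
      (['4'], [['4'], ['1'], ['5'], ['7']]),
      (['5'], [['5'], ['2'], ['4'], ['6'], ['8']]),
      (['6'], [['6'], ['3'], ['5'], ['9']]),
      (['7'], [['7'], ['4'], ['8']]),
      (['8'], [['8'], ['5'], ['7'], ['9'], ['0']]),
      (['9'], [['9'], ['6'], ['8']]),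
      (['0'], [['0'], ['8']]) ]

def get_pins (observed : String) : List String :=
  let cs : List Char := observed.toList
  let xs0 : List (List (List Char)) := [[[]], [[]], [[]], [[]], [[]], [[]], [[]], [[]]]
  -- for i in range(len(observed)): xs[i] = xss[observed[i]]   (in range inside Pre_)
  let xs := (PySem.List.pyRange 0 (PySem.List.len cs) 1).foldl
    (fun xs i => PySem.List.pySetD xs i (pinTable.getD [PySem.List.pyGetD cs i ' '] [])) xs0
  let ys := (PySem.List.pyGetD xs 0 []).flatMap fun x1 =>
            (PySem.List.pyGetD xs 1 []).flatMap fun x2 =>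
            (PySem.List.pyGetD xs 2 []).flatMap fun x3 =>
            (PySem.List.pyGetD xs 3 []).flatMap fun x4 =>
            (PySem.List.pyGetD xs 4 []).flatMap fun x5 =>
            (PySem.List.pyGetD xs 5 []).flatMap fun x6 =>
            (PySem.List.pyGetD xs 6 []).flatMap fun x7 =>
            (PySem.List.pyGetD xs 7 []).map fun x8 =>
              x1 ++ x2 ++ x3 ++ x4 ++ x5 ++ x6 ++ x7 ++ x8
  ys.map String.ofList

-- ===== PORT B =====
-- Source B's neighbor map: values are strings, i.e. List Char here.
def pinStr : PySem.Dict (List Char) (List Char) :=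
  PySem.Dict.ofList
    [ (['1'], ['1', '2', '4']),
      (['2'], ['2', '1', '3', '5']),
      (['3'], ['3', '2', '6']),
      (['4'], ['4', '1', '5', '7']),
      (['5'], ['5', '2', '4', '6', '8']),
      (['6'], ['6', '3', '5', '9']),
      (['7'], ['7', '4', '8']),
      (['8'], ['8', '5', '7', '9', '0']),
      (['9'], ['9', '6', '8']),
      (['0'], ['0', '8']) ]

-- build(i): recursion on the suffix of observed starting at i
def pinBuild : List Char → List (List Char)
  | [] => [[]]
  | c :: cs => (pinStr.getD [c] []).flatMap fun x => (pinBuild cs).map fun rest => x :: rest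

def get_pins_alt (observed : String) : List String :=
  (pinBuild observed.toList).map String.ofList

-- ===== PRECONDITION & SPEC =====
-- Pre_ = exactly the inputs A returns on: at most 8 characters (a 9th raises IndexError)
-- and every character a decimal digit (anything else raises KeyError).
def Pre_get_pins (observed : String) : Prop :=
  observed.toList.length ≤ 8 ∧ observed.toList.all (fun c => PySem.Chars.isdigit c) = true
instance (observed : String) : Decidable (Pre_get_pins observed) := by
  unfold Pre_get_pins; infer_instance

def pvWitness_get_pins : String := "908"

def Spec_get_pins (observed : String) (out : List String) : Prop := out = get_pins_alt observed
instance (observed : String) (out : List String) : Decidable (Spec_get_pins observed out) := by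
  unfold Spec_get_pins; infer_instance

-- ===== CLAIM (what is proved, stated in full; the proofs are below) =====
def Claim_equal_get_pins : Prop := ∀ (observed : String), Dom_get_pins observed → Pre_get_pins observed → Spec_get_pins observed (get_pins observed)

-- ===== LEMMAS AND PROOFS =====
-- A's neighbour lists, looked up once per character
def pinNb (c : Char) : List (List Char) := pinTable.getD [c] []

-- A's neighbour list for any character is B's neighbour string, each char boxed in a
-- singleton list (for non-digit characters both defaults give [] = [].map _).
set_option maxHeartbeats 1600000 in
theorem pinNb_eq (c : Char) : pinNb c = (pinStr.getD [c] []).map (fun x => [x]) := by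
  simp only [pinNb, pinTable, pinStr, PySem.Dict.ofList, PySem.Dict.update, List.foldl,
    PySem.Dict.getD_insert, PySem.Dict.getD_empty]
  split_ifs <;> rfl

-- the generalized nested product with a front accumulator
def pinF : List (List (List Char)) → List Char → List (List Char)
  | [], r => [r]
  | l :: ls, r => l.flatMap fun x => pinF ls (r ++ x)

theorem set_range_foldl {α : Type} (g : Nat → α) :
    ∀ (m : Nat) (xs0 : List α), m ≤ xs0.length →
      (List.range m).foldl (fun xs k => xs.set k (g k)) xs0
        = (List.range m).map g ++ xs0.drop m := by
  intro m
  induction m with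
  | zero => intro xs0 _; simp
  | succ m ih =>
    intro xs0 h
    rw [List.range_succ, List.foldl_append, ih xs0 (by omega)]
    simp only [List.foldl_cons, List.foldl_nil]
    rw [List.set_append, if_neg (by simp)]
    simp only [List.length_map, List.length_range, Nat.sub_self, List.map_append, List.map_cons,
      List.map_nil]
    rw [List.drop_eq_getElem_cons (show m < xs0.length by omega), List.set_cons_zero]
    simp only [List.singleton_append, List.append_assoc]

theorem xs_loop (cs : List Char) (h : cs.length ≤ 8) :
    (PySem.List.pyRange 0 (PySem.List.len cs) 1).foldl
      (fun xs i => PySem.List.pySetD xs i (pinTable.getD [PySem.List.pyGetD cs i ' '] []))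
      ([[[]], [[]], [[]], [[]], [[]], [[]], [[]], [[]]] : List (List (List Char)))
    = cs.map pinNb ++ List.replicate (8 - cs.length) [[]] := by
  rw [show PySem.List.len cs = (cs.length : Int) from PySem.List.len_eq cs,
      PySem.List.pyRange_zero_nat, List.foldl_map]
  have hbody : (fun (xs : List (List (List Char))) (k : Nat) =>
        PySem.List.pySetD xs (k : Int) (pinTable.getD [PySem.List.pyGetD cs (k : Int) ' '] []))
      = fun xs k => xs.set k (pinNb (cs.getD k ' ')) := by
    funext xs k
    simp [pinNb, PySem.List.pySetD_natCast, PySem.List.pyGetD_natCast]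
  rw [hbody, show ([[[]], [[]], [[]], [[]], [[]], [[]], [[]], [[]]] : List (List (List Char)))
        = List.replicate 8 [[]] from rfl,
      set_range_foldl _ cs.length _ (by simpa using h), List.drop_replicate]
  congr 1
  apply List.ext_getElem
  · simp
  · intro i h1 h2
    simp [List.getD, List.getElem?_eq_getElem (show i < cs.length by simpa using h2)]

theorem nest_eq_pinF (xs : List (List (List Char))) (h : xs.length = 8) :
    ((PySem.List.pyGetD xs 0 []).flatMap fun x1 =>
      (PySem.List.pyGetD xs 1 []).flatMap fun x2 =>
      (PySem.List.pyGetD xs 2 []).flatMap fun x3 =>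
      (PySem.List.pyGetD xs 3 []).flatMap fun x4 =>
      (PySem.List.pyGetD xs 4 []).flatMap fun x5 =>
      (PySem.List.pyGetD xs 5 []).flatMap fun x6 =>
      (PySem.List.pyGetD xs 6 []).flatMap fun x7 =>
      (PySem.List.pyGetD xs 7 []).map fun x8 =>
        x1 ++ x2 ++ x3 ++ x4 ++ x5 ++ x6 ++ x7 ++ x8)
      = pinF xs [] := by
  match xs, h with
  | [a, b, c, d, e, f, g, h8], _ =>
    simp [pinF, PySem.List.pyGetD, List.map_eq_flatMap]

theorem pinF_replicate (k : Nat) : ∀ r, pinF (List.replicate k [[]]) r = [r] := by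
  induction k with
  | zero => intro r; simp [pinF]
  | succ k ih => intro r; simp [List.replicate_succ, pinF, ih]

theorem pinF_pad (ls : List (List (List Char))) (k : Nat) :
    ∀ r, pinF (ls ++ List.replicate k [[]]) r = pinF ls r := by
  induction ls with
  | nil => intro r; simp [pinF, pinF_replicate]
  | cons l ls ih => intro r; simp only [List.cons_append, pinF, ih]

-- A's nested product over the looked-up neighbour lists is B's recursive builder
theorem pinF_map_eq_build (cs : List Char) :
    ∀ r, pinF (cs.map pinNb) r = (pinBuild cs).map (fun p => r ++ p) := by
  induction cs with
  | nil => intro r; simp [pinF, pinBuild]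
  | cons c cs ih =>
    intro r
    simp only [List.map_cons, pinF, pinBuild, pinNb_eq c, List.flatMap_map, ih,
      List.map_flatMap, List.map_map]
    congr 1
    funext x
    congr 1
    funext p
    simp

-- ===== VERDICT (by name: the statement is the Claim_ definition above) =====
theorem get_pins_spec : Claim_equal_get_pins := by
  intro observed _ hpre
  unfold Spec_get_pins
  simp only [get_pins, get_pins_alt]
  obtain ⟨h8, -⟩ := hpre
  rw [xs_loop observed.toList h8,
      nest_eq_pinF _ (by
        rw [List.length_append, List.length_map, List.length_replicate]; omega),
      pinF_pad, pinF_map_eq_build]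
  simp
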